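-- pv_equiv track=rewrite | github.com/okeiga/Loops | plates.py | numbers_at_end
-- ===== SOURCE A (Python) =====
-- def numbers_at_end(plate):
--     # Check for the correct use of numbers:
--     # - Numbers can only appear at the end of the plate
--     # - The first number cannot be '0' if numbers are used
--     for i in range(len(plate)):
--         if plate[i].isdigit():
--             # Check if all characters after the first number are also digits
--             if not plate[i:].isdigit():
--                 return False
--             # Ensure the first number is not '0'
--             if plate[i] == '0':
--                 return False
--             break
--     return True
-- ===== SOURCE B (Python) =====
-- def numbers_at_end(plate):
--     # Count the maximal trailing run of digits by scanning from the right.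
--     n = 0
--     for ch in reversed(plate):
--         if ch.isdigit():
--             n += 1
--         else:
--             break
--     start = len(plate) - n
--     # No digit may appear before the trailing run.
--     for ch in plate[:start]:
--         if ch.isdigit():
--             return False
--     # A nonempty trailing run must not start with '0'.
--     return not (n > 0 and plate[start] == '0')
-- ===== Notes on version B (the rewrite author's own statement) =====
-- stated objective: alternative
-- what changed: Instead of scanning left-to-right for the first digit and re-checking the whole suffix with plate[i:].isdigit(), B scans from the right to measure the maximal trailing digit run, then checks the prefix for stray digits and the run's first character for '0'.
import Mathlib
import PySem

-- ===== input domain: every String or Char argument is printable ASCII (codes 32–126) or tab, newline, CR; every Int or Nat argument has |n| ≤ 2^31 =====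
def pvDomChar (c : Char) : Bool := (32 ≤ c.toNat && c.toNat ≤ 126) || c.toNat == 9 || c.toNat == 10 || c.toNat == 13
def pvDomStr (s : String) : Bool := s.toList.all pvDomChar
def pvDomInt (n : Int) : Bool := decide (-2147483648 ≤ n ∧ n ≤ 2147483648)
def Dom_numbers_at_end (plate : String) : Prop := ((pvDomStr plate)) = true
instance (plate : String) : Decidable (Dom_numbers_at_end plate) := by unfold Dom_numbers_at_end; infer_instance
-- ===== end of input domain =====

-- B puts the validation the other way round: measure the trailing digit run from the right,
-- then forbid digits in the prefix and a leading '0' in the run (alternative decomposition, same cost).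

-- ===== PORT A =====
-- the for-loop over i: at index i the current suffix is plate[i:]; break/return end the loop
def pvALoop : List Char → Bool
  | [] => true
  | c :: rest =>
    if PySem.Chars.isdigit c then
      if !(PySem.Chars.strIsdigit (c :: rest)) then false
      else if c = '0' then false
      else true
    else pvALoop rest

def numbers_at_end (plate : String) : Bool := pvALoop plate.toList

-- ===== PORT B =====
-- the reversed() loop counting the trailing digit run (break at the first non-digit)
def pvRunLen : List Char → Nat
  | [] => 0
  | c :: rest => if PySem.Chars.isdigit c then pvRunLen rest + 1 else 0

def numbers_at_end_alt (plate : String) : Bool :=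
  let cs := plate.toList
  let n := pvRunLen cs.reverse
  let start := cs.length - n
  if (cs.take start).any PySem.Chars.isdigit then false
  else !(decide (0 < n) && (cs.getD start ' ' == '0'))

-- ===== PRECONDITION & SPEC =====
def Spec_numbers_at_end (plate : String) (out : Bool) : Prop := out = numbers_at_end_alt plate
instance (plate : String) (out : Bool) : Decidable (Spec_numbers_at_end plate out) := by unfold Spec_numbers_at_end; infer_instance

-- ===== CLAIM (what is proved, stated in full; the proofs are below) =====
def Claim_equal_numbers_at_end : Prop := ∀ (plate : String), Dom_numbers_at_end plate → Spec_numbers_at_end plate (numbers_at_end plate)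

-- ===== LEMMAS AND PROOFS =====
theorem pvRunLen_le (l : List Char) : pvRunLen l ≤ l.length := by
  induction l with
  | nil => simp [pvRunLen]
  | cons c rest ih => simp only [pvRunLen, List.length_cons]; split <;> omega

theorem pvRunLen_all (l : List Char) (h : l.all PySem.Chars.isdigit = true) :
    pvRunLen l = l.length := by
  induction l with
  | nil => rfl
  | cons c rest ih =>
    simp only [List.all_cons, Bool.and_eq_true] at h
    simp [pvRunLen, h.1, ih h.2]

theorem pvRunLen_lt (l : List Char) (h : l.all PySem.Chars.isdigit = false) :
    pvRunLen l < l.length := by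
  induction l with
  | nil => simp at h
  | cons c rest ih =>
    simp only [List.all_cons, Bool.and_eq_false_iff] at h
    rcases h with h | h
    · simp [pvRunLen, h]
    · have := ih h
      simp only [pvRunLen, List.length_cons]; split <;> omega

theorem pvRunLen_append_nondigit (l : List Char) (c : Char)
    (h : PySem.Chars.isdigit c = false) : pvRunLen (l ++ [c]) = pvRunLen l := by
  induction l with
  | nil => simp [pvRunLen, h]
  | cons d rest ih => simp [pvRunLen, ih]

theorem pv_main (cs : List Char) :
    pvALoop cs =
      (let n := pvRunLen cs.reverse
       let start := cs.length - n
       if (cs.take start).any PySem.Chars.isdigit then false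
       else !(decide (0 < n) && (cs.getD start ' ' == '0'))) := by
  induction cs with
  | nil => rfl
  | cons c rest ih =>
    simp only
    by_cases hc : PySem.Chars.isdigit c = true
    · by_cases hall : rest.all PySem.Chars.isdigit = true
      · -- whole string is digits: run covers everything, start = 0
        have hn : pvRunLen (c :: rest).reverse = rest.length + 1 := by
          have : ((c :: rest).reverse).all PySem.Chars.isdigit = true := by
            simp [List.all_reverse, hc, hall]
          simpa using pvRunLen_all _ this
        rw [List.reverse_cons] at hn ⊢
        rw [hn]
        have hstart : (c :: rest).length - (rest.length + 1) = 0 := by simp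
        rw [hstart]
        have hdig : PySem.Chars.strIsdigit (c :: rest) = true := by
          simp [PySem.Chars.strIsdigit, hc, hall]
        simp only [pvALoop, hc, if_true, hdig, Bool.not_true, Bool.false_eq_true, if_false,
          List.take_zero, List.any_nil, List.getD_cons_zero]
        by_cases h0 : c = '0' <;> simp [h0]
      · -- a non-digit follows the first digit: the prefix check catches c
        have hall' : rest.all PySem.Chars.isdigit = false := by
          simpa using hall
        have hlt : pvRunLen (rest.reverse ++ [c]) < rest.length + 1 := by
          have : ((rest.reverse ++ [c]).all PySem.Chars.isdigit) = false := by
            simp [List.all_append, List.all_reverse, hall']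
          simpa using pvRunLen_lt _ this
        rw [List.reverse_cons]
        have hstart : ∃ s, (c :: rest).length - pvRunLen (rest.reverse ++ [c]) = s + 1 := by
          refine ⟨rest.length - pvRunLen (rest.reverse ++ [c]), ?_⟩
          simp only [List.length_cons]; omega
        obtain ⟨s, hs⟩ := hstart
        rw [hs, List.take_succ_cons]
        have hany : (c :: List.take s rest).any PySem.Chars.isdigit = true := by
          simp [hc]
        rw [hany, if_pos rfl]
        have hdig : PySem.Chars.strIsdigit (c :: rest) = false := by
          simp [PySem.Chars.strIsdigit, hall']
        simp [pvALoop, hc, hdig]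
    · -- head not a digit: B on c :: rest reduces to B on rest
      have hc' : PySem.Chars.isdigit c = false := by simpa using hc
      rw [List.reverse_cons, pvRunLen_append_nondigit _ _ hc']
      have hle : pvRunLen rest.reverse ≤ rest.length := by
        simpa using pvRunLen_le rest.reverse
      have hs : (c :: rest).length - pvRunLen rest.reverse
          = (rest.length - pvRunLen rest.reverse) + 1 := by
        simp only [List.length_cons]; omega
      rw [hs, List.take_succ_cons, List.getD_cons_succ]
      have : (c :: List.take (rest.length - pvRunLen rest.reverse) rest).any
          PySem.Chars.isdigit
          = (List.take (rest.length - pvRunLen rest.reverse) rest).any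
            PySem.Chars.isdigit := by
        simp [hc']
      rw [this]
      simpa only [pvALoop, hc', Bool.false_eq_true, if_false] using ih

-- ===== VERDICT (by name: the statement is the Claim_ definition above) =====
theorem numbers_at_end_spec : Claim_equal_numbers_at_end := by
  intro plate _
  unfold Spec_numbers_at_end numbers_at_end numbers_at_end_alt
  exact pv_main plate.toList
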